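-- pv_equiv track=rewrite | github.com/Akshaj1234512/Music-AI | fretting_transformer/src/inference/postprocess.py | _reconstruct_tokens
-- ===== SOURCE A (Python) =====
-- from typing import List, Tuple, Dict, Optional, Union
--
-- def _reconstruct_tokens(
--                       original_tokens: List[str],
--                       corrected_tabs: List[Tuple[int, int]]) -> List[str]:
--     """
--     Reconstruct token sequence with corrected tablature.
--
--     Args:
--         original_tokens: Original output tokens
--         corrected_tabs: Corrected (string, fret) pairs
--
--     Returns:
--         Corrected token sequence
--     """
--     corrected_tokens = []
--     tab_index = 0
--
--     for token in original_tokens: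
--         if token.startswith('TAB<') and token.endswith('>'):
--             # Replace with corrected tab
--             if tab_index < len(corrected_tabs):
--                 string, fret = corrected_tabs[tab_index]
--                 corrected_token = f"TAB<{string},{fret}>"
--                 corrected_tokens.append(corrected_token)
--                 tab_index += 1
--             else:
--                 # Keep original if we run out of corrections
--                 corrected_tokens.append(token)
--         else:
--             # Keep non-tab tokens as-is
--             corrected_tokens.append(token)
--
--     return corrected_tokens
-- ===== SOURCE B (Python) =====
-- def _reconstruct_tokens(original_tokens, corrected_tabs):
--     out = []
--     rest = original_tokens
--     for string, fret in corrected_tabs: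
--         i = next((k for k, t in enumerate(rest)
--                   if t.startswith('TAB<') and t.endswith('>')), None)
--         if i is None:
--             break
--         out += rest[:i]
--         out.append(f"TAB<{string},{fret}>")
--         rest = rest[i + 1:]
--     return out + rest
-- ===== Notes on version B (the rewrite author's own statement) =====
-- stated objective: alternative
-- what changed: B inverts the loop structure: instead of A's single token-driven pass carrying a correction counter, B iterates over the corrections, each step searching the remaining token suffix for the next TAB token and splicing the untouched segment, the formatted correction, and recursing on the suffix; it breaks when no TAB remains.
import Mathlib
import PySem

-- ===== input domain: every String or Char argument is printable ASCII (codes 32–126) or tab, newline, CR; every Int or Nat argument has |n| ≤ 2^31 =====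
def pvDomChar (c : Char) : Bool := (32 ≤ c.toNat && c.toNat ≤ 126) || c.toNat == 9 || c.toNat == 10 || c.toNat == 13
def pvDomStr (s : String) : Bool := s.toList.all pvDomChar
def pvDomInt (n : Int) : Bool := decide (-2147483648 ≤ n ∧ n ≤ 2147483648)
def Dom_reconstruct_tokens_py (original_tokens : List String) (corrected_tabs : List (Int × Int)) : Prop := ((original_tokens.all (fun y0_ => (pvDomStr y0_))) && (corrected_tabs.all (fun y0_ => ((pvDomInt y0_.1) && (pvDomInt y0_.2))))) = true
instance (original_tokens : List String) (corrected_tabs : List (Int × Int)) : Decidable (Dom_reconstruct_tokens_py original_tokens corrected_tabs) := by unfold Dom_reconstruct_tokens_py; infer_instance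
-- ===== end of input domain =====

-- B inverts the loop structure: it iterates over the corrections, each step finding the next
-- TAB token in the remaining suffix and splicing segments (objective: alternative decomposition).
-- shared helpers: the token test and the f-string "TAB<{string},{fret}>"
def pvIsTab (t : String) : Bool := PySem.Str.startswith t "TAB<" && PySem.Str.endswith t ">"
def pvMkTab (p : Int × Int) : String := "TAB<" ++ PySem.Int.toStr p.1 ++ "," ++ PySem.Int.toStr p.2 ++ ">"

-- ===== PORT A =====
-- A's for-loop with accumulator `corrected_tokens` and counter `tab_index`;
-- `corrected_tabs[tab_index]` is exact via getD because of the guard `tab_index < len(corrected_tabs)`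
def reconstruct_tokens_py_go (corrected_tabs : List (Int × Int)) : List String → Nat → List String
  | [], _ => []
  | t :: ts, idx =>
    if pvIsTab t then
      if idx < corrected_tabs.length then
        pvMkTab (corrected_tabs.getD idx (0, 0)) :: reconstruct_tokens_py_go corrected_tabs ts (idx + 1)
      else
        t :: reconstruct_tokens_py_go corrected_tabs ts idx
    else
      t :: reconstruct_tokens_py_go corrected_tabs ts idx

def reconstruct_tokens_py (original_tokens : List String) (corrected_tabs : List (Int × Int)) : List String :=
  reconstruct_tokens_py_go corrected_tabs original_tokens 0

-- ===== PORT B =====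
-- the generator `next((k for k, t in enumerate(rest) if …), None)`: index of the first TAB token
def pvFindTab : List String → Nat → Option Nat
  | [], _ => none
  | t :: ts, k => if pvIsTab t then some k else pvFindTab ts (k + 1)

-- the for-loop over corrected_tabs with state (out, rest); `break`/loop-end both return out ++ rest
def reconstruct_tokens_py_alt_go : List (Int × Int) → List String → List String → List String
  | [], out, rest => out ++ rest
  | c :: cs, out, rest =>
    match pvFindTab rest 0 with
    | none => out ++ rest
    | some i => reconstruct_tokens_py_alt_go cs (out ++ rest.take i ++ [pvMkTab c]) (rest.drop (i + 1))

def reconstruct_tokens_py_alt (original_tokens : List String) (corrected_tabs : List (Int × Int)) : List String :=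
  reconstruct_tokens_py_alt_go corrected_tabs [] original_tokens

-- ===== PRECONDITION & SPEC =====
def Spec_reconstruct_tokens_py (original_tokens : List String) (corrected_tabs : List (Int × Int)) (out : List String) : Prop := out = reconstruct_tokens_py_alt original_tokens corrected_tabs
instance (original_tokens : List String) (corrected_tabs : List (Int × Int)) (out : List String) : Decidable (Spec_reconstruct_tokens_py original_tokens corrected_tabs out) := by unfold Spec_reconstruct_tokens_py; infer_instance

-- ===== CLAIM (what is proved, stated in full; the proofs are below) =====
def Claim_equal_reconstruct_tokens_py : Prop := ∀ (original_tokens : List String) (corrected_tabs : List (Int × Int)), Dom_reconstruct_tokens_py original_tokens corrected_tabs → Spec_reconstruct_tokens_py original_tokens corrected_tabs (reconstruct_tokens_py original_tokens corrected_tabs)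

-- ===== LEMMAS AND PROOFS =====

-- ===== VERDICT (by name: the statement is the Claim_ definition above) =====
-- the common functional specification: consume corrections from the front
def pvGo : List (Int × Int) → List String → List String
  | _, [] => []
  | cts, t :: ts =>
    if pvIsTab t then
      match cts with
      | c :: rest => pvMkTab c :: pvGo rest ts
      | [] => t :: pvGo [] ts
    else
      t :: pvGo cts ts

theorem pvGo_nil (ts : List String) : pvGo [] ts = ts := by
  induction ts with
  | nil => rfl
  | cons t ts ih => by_cases h : pvIsTab t = true <;> simp [pvGo, h, ih]

theorem reconstruct_tokens_py_go_eq (cts : List (Int × Int)) (ts : List String) (idx : Nat) :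
    reconstruct_tokens_py_go cts ts idx = pvGo (cts.drop idx) ts := by
  induction ts generalizing idx with
  | nil => rfl
  | cons t ts ih =>
    simp only [reconstruct_tokens_py_go, pvGo]
    by_cases h : pvIsTab t = true
    · rw [if_pos h, if_pos h]
      rcases hd : cts.drop idx with _ | ⟨c, rest⟩
      · have hlen : ¬ idx < cts.length := by
          have := congrArg List.length hd
          simp [List.length_drop] at this
          omega
        simp [hlen, ih, hd]
      · have hlen : idx < cts.length := by
          have := congrArg List.length hd
          simp [List.length_drop] at this
          omega
        have h1 : cts[idx]? = some c := by
          rw [← List.head?_drop, hd]; rfl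
        have hget : cts[idx] = c := (List.getElem_eq_iff hlen).mpr h1
        have hdrop : cts.drop (idx + 1) = rest := by
          have := List.tail_drop (l := cts) (i := idx)
          rw [hd] at this
          simpa using this.symm
        simp [hlen, hget, ih, hdrop]
    · rw [if_neg h, if_neg h]
      simp [ih]

theorem pvFindTab_shift (ts : List String) (k : Nat) :
    pvFindTab ts (k + 1) = Option.map (· + 1) (pvFindTab ts k) := by
  induction ts generalizing k with
  | nil => rfl
  | cons t ts ih =>
    by_cases h : pvIsTab t = true <;> simp [pvFindTab, h, ih]

theorem pvGo_split (c : Int × Int) (rest : List (Int × Int)) (ts : List String) :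
    pvGo (c :: rest) ts =
      match pvFindTab ts 0 with
      | some i => ts.take i ++ [pvMkTab c] ++ pvGo rest (ts.drop (i + 1))
      | none => ts := by
  induction ts with
  | nil => rfl
  | cons t ts ih =>
    by_cases h : pvIsTab t = true
    · simp [pvGo, pvFindTab, h]
    · simp only [pvGo, pvFindTab, h, Bool.false_eq_true, if_false]
      rw [pvFindTab_shift]
      rcases hf : pvFindTab ts 0 with _ | i
      · simp [hf] at ih; simp [ih]
      · simp [hf] at ih
        simp [ih, List.take_succ_cons, List.drop_succ_cons]

theorem alt_go_eq (cts : List (Int × Int)) (out rest : List String) :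
    reconstruct_tokens_py_alt_go cts out rest = out ++ pvGo cts rest := by
  induction cts generalizing out rest with
  | nil => simp [reconstruct_tokens_py_alt_go, pvGo_nil]
  | cons c cs ih =>
    simp only [reconstruct_tokens_py_alt_go]
    rw [pvGo_split]
    rcases hf : pvFindTab rest 0 with _ | i
    · rfl
    · simp [ih]

-- ===== VERDICT (by name: the statement is the Claim_ definition above) =====
theorem reconstruct_tokens_py_spec : Claim_equal_reconstruct_tokens_py := by
  intro ots cts _
  unfold Spec_reconstruct_tokens_py reconstruct_tokens_py reconstruct_tokens_py_alt
  rw [reconstruct_tokens_py_go_eq, alt_go_eq]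
  simp
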